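-- pv_equiv track=rewrite | github.com/algbio/flowpaths | benchmarks/correct_flow_dataset.py | _subpath_to_nodes
-- ===== SOURCE A (Python) =====
-- def _subpath_to_nodes(subpath_edges):
--     """Convert a subpath edge list [(u,v), ...] back to a node sequence [u,v,...]."""
--     if not subpath_edges:
--         return []
--
--     first_u, first_v = subpath_edges[0]
--     nodes = [str(first_u), str(first_v)]
--     for u, v in subpath_edges[1:]:
--         if str(u) != nodes[-1]:
--             # Non-chain subpath; cannot reconstruct a clean node path.
--             return []
--         nodes.append(str(v))
--     return nodes
-- ===== SOURCE B (Python) =====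
-- def _subpath_to_nodes(subpath_edges):
--     """Columnar: split into heads/tails columns; the chain condition is the
--     wholesale shifted-list equality heads[1:] == tails[:-1]."""
--     if not subpath_edges:
--         return []
--     heads = [str(u) for u, _ in subpath_edges]
--     tails = [str(v) for _, v in subpath_edges]
--     if heads[1:] != tails[:-1]:
--         return []
--     return [heads[0]] + tails
-- ===== Notes on version B (the rewrite author's own statement) =====
-- stated objective: alternative
-- what changed: Replaced A's fused loop (append each v while comparing str(u) to nodes[-1]) with a columnar formulation: project the edge list into a heads column and a tails column, decide chain continuity by the single shifted-list equality heads[1:] == tails[:-1], and emit [heads[0]] + tails with no element-by-element scan.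
import Mathlib
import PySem

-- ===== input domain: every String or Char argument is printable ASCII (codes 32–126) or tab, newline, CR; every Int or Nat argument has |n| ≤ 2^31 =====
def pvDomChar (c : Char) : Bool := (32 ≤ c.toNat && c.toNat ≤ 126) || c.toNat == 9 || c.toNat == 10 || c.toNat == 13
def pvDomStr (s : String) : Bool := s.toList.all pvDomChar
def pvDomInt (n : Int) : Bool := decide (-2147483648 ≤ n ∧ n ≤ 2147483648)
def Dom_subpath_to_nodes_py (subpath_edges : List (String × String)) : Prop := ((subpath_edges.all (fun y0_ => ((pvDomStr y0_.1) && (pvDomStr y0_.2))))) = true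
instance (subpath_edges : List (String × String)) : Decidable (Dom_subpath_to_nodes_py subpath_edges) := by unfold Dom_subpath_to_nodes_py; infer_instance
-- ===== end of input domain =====

-- B replaces A's fused accumulate-and-check loop by a columnar formulation:
-- heads/tails columns, chain continuity as the shifted-list equality heads[1:] == tails[:-1] (objective: alternative).

-- ===== PORT A =====
-- the for-loop: nodes grows at the back, nodes[-1] is its last element (nodes is never empty here)
def pvGoA : List String → List (String × String) → List String
  | nodes, [] => nodes
  | nodes, (u, v) :: rest =>
    if u ≠ nodes.getLastD "" then [] else pvGoA (nodes ++ [v]) rest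

def subpath_to_nodes_py (subpath_edges : List (String × String)) : List String :=
  match subpath_edges with
  | [] => []
  | (first_u, first_v) :: rest => pvGoA [first_u, first_v] rest

-- ===== PORT B =====
def subpath_to_nodes_py_alt (subpath_edges : List (String × String)) : List String :=
  match subpath_edges with
  | [] => []
  | _ =>
    let heads := subpath_edges.map (·.1)
    let tails := subpath_edges.map (·.2)
    if heads.drop 1 ≠ tails.dropLast then [] else heads.headD "" :: tails

-- ===== PRECONDITION & SPEC =====
def Spec_subpath_to_nodes_py (subpath_edges : List (String × String)) (out : List String) : Prop := out = subpath_to_nodes_py_alt subpath_edges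
instance (subpath_edges : List (String × String)) (out : List String) : Decidable (Spec_subpath_to_nodes_py subpath_edges out) := by unfold Spec_subpath_to_nodes_py; infer_instance

-- ===== CLAIM (what is proved, stated in full; the proofs are below) =====
def Claim_equal_subpath_to_nodes_py : Prop := ∀ (subpath_edges : List (String × String)), Dom_subpath_to_nodes_py subpath_edges → Spec_subpath_to_nodes_py subpath_edges (subpath_to_nodes_py subpath_edges)

-- ===== LEMMAS AND PROOFS =====

-- chain check starting from a known previous node (proof-side characterisation)
def pvChainFrom (prev : String) : List (String × String) → Bool
  | [] => true
  | (u, v) :: t => (u == prev) && pvChainFrom v t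

theorem pvGoA_eq (t : List (String × String)) (nodes : List String) (v : String) :
    pvGoA (nodes ++ [v]) t =
      if pvChainFrom v t then (nodes ++ [v]) ++ t.map (·.2) else [] := by
  induction t generalizing nodes v with
  | nil => simp [pvGoA, pvChainFrom]
  | cons hd tl ih =>
    obtain ⟨u, w⟩ := hd
    simp only [pvGoA, pvChainFrom, List.getLastD_concat]
    by_cases hu : u = v
    · subst hu
      have h2 := ih (nodes ++ [u]) w
      simp only [List.append_assoc, List.cons_append,
        List.nil_append] at h2 ⊢
      by_cases hc : pvChainFrom w tl = true <;> simp [hc] at h2 ⊢ <;> exact h2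
    · simp [hu]

-- the shifted-column equality is exactly the chain condition
theorem shift_eq_chain (v : String) (t : List (String × String)) :
    (t.map (·.1) = (v :: t.map (·.2)).dropLast) ↔ pvChainFrom v t = true := by
  induction t generalizing v with
  | nil => simp [pvChainFrom]
  | cons hd tl ih =>
    obtain ⟨u, w⟩ := hd
    simp only [List.map, pvChainFrom, Bool.and_eq_true, beq_iff_eq,
      List.dropLast_cons₂, List.cons.injEq, ih w]

-- ===== VERDICT (by name: the statement is the Claim_ definition above) =====
theorem subpath_to_nodes_py_spec : Claim_equal_subpath_to_nodes_py := by
  intro es _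
  unfold Spec_subpath_to_nodes_py
  match es with
  | [] => rfl
  | (u0, v0) :: t =>
    show pvGoA [u0, v0] t = subpath_to_nodes_py_alt ((u0, v0) :: t)
    have h := pvGoA_eq t [u0] v0
    simp only [subpath_to_nodes_py_alt, List.map, List.drop, List.headD]
    by_cases hs : t.map (·.1) = (v0 :: t.map (·.2)).dropLast
    · have hc := (shift_eq_chain v0 t).mp hs
      simp [hs, hc] at h ⊢
      simpa using h
    · have hc : pvChainFrom v0 t ≠ true := fun hh => hs ((shift_eq_chain v0 t).mpr hh)
      simp [hs, hc] at h ⊢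
      exact h
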